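-- pv_equiv track=rewrite | github.com/LiviuNicolaeLeoca/Roulette-Bot | NewFibonacci.py | calculate_dozen_frequency
-- ===== SOURCE A (Python) =====
-- def calculate_dozen_frequency(numbers):
--     dozens_frequency = {"1st12": 0, "2nd12": 0, "3rd12": 0}
--     for number in numbers:
--         number = int(number)
--         if 1 <= number <= 12:
--             dozens_frequency["1st12"] += 1
--         elif 13 <= number <= 24:
--             dozens_frequency["2nd12"] += 1
--         elif 25 <= number <= 36:
--             dozens_frequency["3rd12"] += 1
--     return dozens_frequency
-- ===== SOURCE B (Python) =====
-- def calculate_dozen_frequency(numbers):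
--     values = [int(number) for number in numbers]
--     bounds = {"1st12": (1, 12), "2nd12": (13, 24), "3rd12": (25, 36)}
--     return {label: sum(lo <= v <= hi for v in values)
--             for label, (lo, hi) in bounds.items()}
-- ===== Notes on version B (the rewrite author's own statement) =====
-- stated objective: idiomatic
-- what changed: Replaces A's single pass with an in-place dict accumulator and a three-way if/elif cascade by staged per-bucket counting: convert once, then for each labelled bound in a bounds table count the matching values with a separate sum() pass, assembling the result in a dict comprehension.
import Mathlib
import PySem

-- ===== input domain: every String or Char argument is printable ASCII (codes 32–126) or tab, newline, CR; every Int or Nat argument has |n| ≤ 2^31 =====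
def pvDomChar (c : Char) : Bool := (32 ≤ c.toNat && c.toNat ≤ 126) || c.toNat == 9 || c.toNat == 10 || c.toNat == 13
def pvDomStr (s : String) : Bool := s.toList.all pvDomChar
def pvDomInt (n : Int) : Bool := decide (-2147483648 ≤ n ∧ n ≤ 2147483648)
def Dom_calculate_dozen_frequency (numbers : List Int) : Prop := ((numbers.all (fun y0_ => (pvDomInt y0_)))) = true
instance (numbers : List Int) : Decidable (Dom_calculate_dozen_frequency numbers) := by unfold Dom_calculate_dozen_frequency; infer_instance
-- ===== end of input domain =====

-- B replaces A's single pass with an in-place dict accumulator and an if/elif cascade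
-- by staged per-bucket counting passes over a labelled bounds table (idiomatic).

-- ===== PORT A =====
def calculate_dozen_frequency (numbers : List Int) : List (String × Int) :=
  let d : PySem.Dict String Int :=
    ((PySem.Dict.empty.insert "1st12" 0).insert "2nd12" 0).insert "3rd12" 0
  let d := numbers.foldl (fun d number =>
    if 1 ≤ number ∧ number ≤ 12 then d.modify "1st12" 0 (· + 1)
    else if 13 ≤ number ∧ number ≤ 24 then d.modify "2nd12" 0 (· + 1)
    else if 25 ≤ number ∧ number ≤ 36 then d.modify "3rd12" 0 (· + 1)
    else d) d
  d.items

-- ===== PORT B =====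
-- int(number) on an int is the identity; sum(lo <= v <= hi for v in values) is a
-- per-bucket counting pass, ported as a foldl adding 1 per matching element.
def calculate_dozen_frequency_alt (numbers : List Int) : List (String × Int) :=
  let values := numbers.map (fun number => number)
  let bounds : List (String × Int × Int) :=
    [("1st12", 1, 12), ("2nd12", 13, 24), ("3rd12", 25, 36)]
  bounds.map (fun lb =>
    (lb.1, values.foldl (fun acc v =>
      acc + (if lb.2.1 ≤ v ∧ v ≤ lb.2.2 then 1 else 0)) 0))

-- ===== PRECONDITION & SPEC =====
def Spec_calculate_dozen_frequency (numbers : List Int) (out : List (String × Int)) : Prop := out = calculate_dozen_frequency_alt numbers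
instance (numbers : List Int) (out : List (String × Int)) : Decidable (Spec_calculate_dozen_frequency numbers out) := by unfold Spec_calculate_dozen_frequency; infer_instance

-- ===== CLAIM (what is proved, stated in full; the proofs are below) =====
def Claim_equal_calculate_dozen_frequency : Prop := ∀ (numbers : List Int), Dom_calculate_dozen_frequency numbers → Spec_calculate_dozen_frequency numbers (calculate_dozen_frequency numbers)

-- ===== LEMMAS AND PROOFS =====

-- the count B's per-bucket pass computes
def pvCnt (lo hi : Int) (l : List Int) : Int :=
  l.foldl (fun acc v => acc + (if lo ≤ v ∧ v ≤ hi then 1 else 0)) 0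

lemma pvCnt_shift (lo hi : Int) (l : List Int) : ∀ (x : Int),
    l.foldl (fun acc v => acc + (if lo ≤ v ∧ v ≤ hi then 1 else 0)) x
      = x + pvCnt lo hi l := by
  induction l with
  | nil => intro x; simp [pvCnt]
  | cons n ns ih =>
    intro x
    simp only [pvCnt, List.foldl_cons] at *
    rw [ih, ih (0 + _)]
    ring

lemma pvCnt_cons (lo hi n : Int) (l : List Int) :
    pvCnt lo hi (n :: l) = (if lo ≤ n ∧ n ≤ hi then 1 else 0) + pvCnt lo hi l := by
  simp only [pvCnt, List.foldl_cons]
  rw [pvCnt_shift]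
  simp [pvCnt]

-- the dict A's loop maintains, as a function of the three counters
def pvDictOf (a b c : Int) : PySem.Dict String Int :=
  PySem.Dict.mk [("1st12", a), ("2nd12", b), ("3rd12", c)]

lemma pvDictOf_mod1 (a b c : Int) :
    (pvDictOf a b c).modify "1st12" 0 (· + 1) = pvDictOf (a + 1) b c := rfl

lemma pvDictOf_mod2 (a b c : Int) :
    (pvDictOf a b c).modify "2nd12" 0 (· + 1) = pvDictOf a (b + 1) c := rfl

lemma pvDictOf_mod3 (a b c : Int) :
    (pvDictOf a b c).modify "3rd12" 0 (· + 1) = pvDictOf a b (c + 1) := rfl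

-- A's single loop lands on the three independent per-bucket counts
lemma pvLoop (numbers : List Int) : ∀ (a b c : Int),
    (numbers.foldl (fun d number =>
      if 1 ≤ number ∧ number ≤ 12 then d.modify "1st12" 0 (· + 1)
      else if 13 ≤ number ∧ number ≤ 24 then d.modify "2nd12" 0 (· + 1)
      else if 25 ≤ number ∧ number ≤ 36 then d.modify "3rd12" 0 (· + 1)
      else d) (pvDictOf a b c))
    = pvDictOf (a + pvCnt 1 12 numbers) (b + pvCnt 13 24 numbers)
        (c + pvCnt 25 36 numbers) := by
  induction numbers with
  | nil => intro a b c; simp [pvCnt]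
  | cons n ns ih =>
    intro a b c
    simp only [List.foldl_cons]
    rw [pvCnt_cons, pvCnt_cons, pvCnt_cons]
    by_cases h1 : 1 ≤ n ∧ n ≤ 12
    · rw [if_pos h1, pvDictOf_mod1, ih]
      rw [if_pos h1, if_neg (by omega), if_neg (by omega)]
      ring_nf
    · by_cases h2 : 13 ≤ n ∧ n ≤ 24
      · rw [if_neg h1, if_pos h2, pvDictOf_mod2, ih]
        rw [if_neg h1, if_pos h2, if_neg (by omega)]
        ring_nf
      · by_cases h3 : 25 ≤ n ∧ n ≤ 36
        · rw [if_neg h1, if_neg h2, if_pos h3, pvDictOf_mod3, ih]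
          rw [if_neg h1, if_neg h2, if_pos h3]
          ring_nf
        · rw [if_neg h1, if_neg h2, if_neg h3, ih]
          rw [if_neg h1, if_neg h2, if_neg h3]
          ring_nf

-- ===== VERDICT (by name: the statement is the Claim_ definition above) =====
theorem calculate_dozen_frequency_spec : Claim_equal_calculate_dozen_frequency := by
  intro numbers _
  show calculate_dozen_frequency numbers = calculate_dozen_frequency_alt numbers
  simp only [calculate_dozen_frequency, calculate_dozen_frequency_alt, List.map_id',
    List.map_cons, List.map_nil]
  rw [show (((PySem.Dict.empty.insert "1st12" (0 : Int)).insert "2nd12" 0).insert "3rd12" 0)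
      = pvDictOf 0 0 0 from rfl, pvLoop]
  simp [pvDictOf, pvCnt]
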